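-- pv_equiv track=rewrite | github.com/jjplatt13/autizimappb | app/core/controlled_vocabulary.py | canonical_service
-- ===== SOURCE A (Python) =====
-- from typing import Dict, List
--
-- CONTROLLED_TERMS: Dict[str, List[str]] = {
--     "aba": [
--         "aba",
--         "applied behavior analysis",
--         "behavior",
--         "behavioral therapy",
--     ],
--     "speech": [
--         "speech therapy",
--         "speech",
--         "slp",
--         "language",
--         "speech-language pathology",
--     ],
--     "ot": [
--         "occupational therapy",
--         "occupational",
--         "ot",
--     ],
--     "pt": [
--         "physical therapy",
--         "physical",
--         "pt",
--     ],
-- }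
--
-- def normalize_query(query: str) -> str:
--     """
--     Normalize a raw search query.
--
--     Option A:
--     - Simple lowercase + strip passthrough
--
--     Option B (future):
--     - Fuzzy matching
--     - Synonym expansion
--     - Locale-aware normalization
--     """
--     return (query or "").strip().lower()
--
-- def canonical_service(query: str) -> str:
--     """
--     Convert a query into a canonical service key if possible.
--
--     Examples:
--         "slp" -> "speech"
--         "Applied Behavior Analysis" -> "aba"
--
--     If no canonical match is found, returns the normalized query.
--     """
--     q = normalize_query(query)
--     if not q:
--         return ""
--
--     for canonical, aliases in CONTROLLED_TERMS.items():
--         if q == canonical: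
--             return canonical
--
--         for alias in aliases:
--             alias_norm = alias.strip().lower()
--             if q == alias_norm:
--                 return canonical
--
--     return q
-- ===== SOURCE B (Python) =====
-- from typing import Dict, List
--
-- CONTROLLED_TERMS: Dict[str, List[str]] = {
--     "aba": [
--         "aba",
--         "applied behavior analysis",
--         "behavior",
--         "behavioral therapy",
--     ],
--     "speech": [
--         "speech therapy",
--         "speech",
--         "slp",
--         "language",
--         "speech-language pathology",
--     ],
--     "ot": [
--         "occupational therapy",
--         "occupational",
--         "ot",
--     ],
--     "pt": [
--         "physical therapy",
--         "physical",
--         "pt",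
--     ],
-- }
--
-- def normalize_query(query: str) -> str:
--     return (query or "").strip().lower()
--
-- # Flatten the vocabulary once into a deduplicated, sorted list of
-- # (normalized alias, canonical key) pairs; lookups binary-search it.
-- _TABLE = sorted({(a.strip().lower(), canonical)
--                  for canonical, aliases in CONTROLLED_TERMS.items()
--                  for a in [canonical] + aliases})
--
-- def canonical_service(query: str) -> str:
--     q = normalize_query(query)
--     if not q:
--         return ""
--     lo, hi = 0, len(_TABLE)
--     while lo < hi:
--         mid = (lo + hi) // 2
--         key, canonical = _TABLE[mid]
--         if key == q:
--             return canonical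
--         if key < q:
--             lo = mid + 1
--         else:
--             hi = mid
--     return q
-- ===== Notes on version B (the rewrite author's own statement) =====
-- stated objective: alternative
-- what changed: Flattens the vocabulary once into a deduplicated sorted list of (normalized alias, canonical) pairs and answers each call with a hand-written binary search over that list instead of A's nested linear scans over the dict of alias lists.
import Mathlib
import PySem

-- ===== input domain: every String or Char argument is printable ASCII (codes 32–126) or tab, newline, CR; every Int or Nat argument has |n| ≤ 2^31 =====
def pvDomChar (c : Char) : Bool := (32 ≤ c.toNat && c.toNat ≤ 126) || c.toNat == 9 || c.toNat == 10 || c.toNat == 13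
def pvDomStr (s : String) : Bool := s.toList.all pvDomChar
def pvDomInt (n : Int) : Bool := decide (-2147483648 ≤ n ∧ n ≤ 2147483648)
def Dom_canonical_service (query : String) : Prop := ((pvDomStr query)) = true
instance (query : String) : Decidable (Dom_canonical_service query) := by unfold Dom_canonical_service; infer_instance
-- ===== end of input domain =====

-- B replaces A's nested alias scan by a sorted flattened (alias, canonical) table binary-searched per call; objective: alternative.

-- ===== PORT A =====
def CONTROLLED_TERMS : List (String × List String) :=
  [ ("aba", ["aba", "applied behavior analysis", "behavior", "behavioral therapy"]),
    ("speech", ["speech therapy", "speech", "slp", "language", "speech-language pathology"]),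
    ("ot", ["occupational therapy", "occupational", "ot"]),
    ("pt", ["physical therapy", "physical", "pt"]) ]

def normalize_query (query : String) : String :=
  PySem.Str.lower (PySem.Str.strip query)

-- inner 'for alias in aliases' loop with early return
def aliasScan (aliases : List String) (canonical q : String) : Option String :=
  match aliases with
  | [] => none
  | alias_ :: rest =>
    let alias_norm := PySem.Str.lower (PySem.Str.strip alias_)
    if q == alias_norm then some canonical else aliasScan rest canonical q

-- outer 'for canonical, aliases in CONTROLLED_TERMS.items()' loop with early return
def termScan (terms : List (String × List String)) (q : String) : Option String :=
  match terms with
  | [] => none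
  | (canonical, aliases) :: rest =>
    if q == canonical then some canonical
    else
      match aliasScan aliases canonical q with
      | some r => some r
      | none => termScan rest q

-- loop result if a canonical match was found, else the fallthrough 'return q'
def afterScan (q : String) : String :=
  match termScan CONTROLLED_TERMS q with
  | some r => r
  | none => q

def canonical_service (query : String) : String :=
  let q := normalize_query query
  if q = "" then "" else afterScan q

-- ===== PORT B =====
-- _TABLE = sorted({(a.strip().lower(), canonical) for canonical, aliases in CONTROLLED_TERMS.items() for a in [canonical] + aliases})
def pvTable : List (String × String) :=
  PySem.List.sorted2
    (PySem.Set.ofList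
      (CONTROLLED_TERMS.flatMap
        (fun p => (p.1 :: p.2).map (fun a => (PySem.Str.lower (PySem.Str.strip a), p.1)))))
    (fun p => p.1.toList) (fun p => p.2.toList)

-- the 'while lo < hi' binary-search loop of Source B, with its three early exits; the extra
-- fuel argument (= hi - lo at entry, strictly decreasing) only makes the recursion structural.
-- Python's 'key < q' on strings is code-point lexicographic = List.lt on the char lists (exact);
-- likewise sorted(...) of the (key, canonical) pairs above is sorted2 by the two char lists (exact).
def bsearchGo (fuel : Nat) (table : List (String × String)) (q : String) (lo hi : Nat) : Option String :=
  match fuel with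
  | 0 => none
  | fuel + 1 =>
    if lo < hi then
      match table[(lo + hi) / 2]? with
      | some (key, canonical) =>
        if key = q then some canonical
        else if key.toList < q.toList then bsearchGo fuel table q ((lo + hi) / 2 + 1) hi
        else bsearchGo fuel table q lo ((lo + hi) / 2)
      | none => none
    else none

def bsearch (table : List (String × String)) (q : String) (lo hi : Nat) : Option String :=
  bsearchGo (hi - lo) table q lo hi

def canonical_service_alt (query : String) : String :=
  let q := normalize_query query
  if q = "" then ""
  else
    match bsearch pvTable q 0 pvTable.length with
    | some canonical => canonical
    | none => q

-- ===== PRECONDITION & SPEC =====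
def Spec_canonical_service (query : String) (out : String) : Prop := out = canonical_service_alt query
instance (query : String) (out : String) : Decidable (Spec_canonical_service query out) := by unfold Spec_canonical_service; infer_instance

-- ===== CLAIM (what is proved, stated in full; the proofs are below) =====
def Claim_equal_canonical_service : Prop := ∀ (query : String), Dom_canonical_service query → Spec_canonical_service query (canonical_service query)

-- ===== LEMMAS AND PROOFS =====
-- a binary search misses whenever the key occurs nowhere in the table
theorem bsearchGo_none (table : List (String × String)) (q : String)
    (h : ∀ p ∈ table, p.1 ≠ q) (fuel : Nat) : ∀ lo hi, bsearchGo fuel table q lo hi = none := by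
  induction fuel with
  | zero => intro lo hi; rfl
  | succ fuel ih =>
    intro lo hi
    rw [bsearchGo]
    split
    · cases e : table[(lo + hi) / 2]? with
      | none => simp
      | some p =>
        obtain ⟨key, canonical⟩ := p
        have hk : key ≠ q := h (key, canonical) (List.mem_of_getElem? e)
        simp only [hk, if_false]
        split
        · exact ih _ _
        · exact ih _ _
    · rfl

theorem bsearch_none (table : List (String × String)) (q : String)
    (h : ∀ p ∈ table, p.1 ≠ q) (lo hi : Nat) : bsearch table q lo hi = none :=
  bsearchGo_none table q h _ lo hi

set_option maxHeartbeats 4000000 in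
theorem core (q : String) :
    afterScan q = (match bsearch pvTable q 0 pvTable.length with
                   | some canonical => canonical
                   | none => q) := by
  by_cases h1 : q = "aba"
  · subst h1; decide
  by_cases h2 : q = "applied behavior analysis"
  · subst h2; decide
  by_cases h3 : q = "behavior"
  · subst h3; decide
  by_cases h4 : q = "behavioral therapy"
  · subst h4; decide
  by_cases h5 : q = "speech"
  · subst h5; decide
  by_cases h6 : q = "speech therapy"
  · subst h6; decide
  by_cases h7 : q = "slp"
  · subst h7; decide
  by_cases h8 : q = "language"
  · subst h8; decide
  by_cases h9 : q = "speech-language pathology"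
  · subst h9; decide
  by_cases h10 : q = "ot"
  · subst h10; decide
  by_cases h11 : q = "occupational therapy"
  · subst h11; decide
  by_cases h12 : q = "occupational"
  · subst h12; decide
  by_cases h13 : q = "pt"
  · subst h13; decide
  by_cases h14 : q = "physical therapy"
  · subst h14; decide
  by_cases h15 : q = "physical"
  · subst h15; decide
  have e1 : PySem.Str.lower (PySem.Str.strip "aba") = "aba" := by decide
  have e2 : PySem.Str.lower (PySem.Str.strip "applied behavior analysis") = "applied behavior analysis" := by decide
  have e3 : PySem.Str.lower (PySem.Str.strip "behavior") = "behavior" := by decide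
  have e4 : PySem.Str.lower (PySem.Str.strip "behavioral therapy") = "behavioral therapy" := by decide
  have e5 : PySem.Str.lower (PySem.Str.strip "speech therapy") = "speech therapy" := by decide
  have e6 : PySem.Str.lower (PySem.Str.strip "speech") = "speech" := by decide
  have e7 : PySem.Str.lower (PySem.Str.strip "slp") = "slp" := by decide
  have e8 : PySem.Str.lower (PySem.Str.strip "language") = "language" := by decide
  have e9 : PySem.Str.lower (PySem.Str.strip "speech-language pathology") = "speech-language pathology" := by decide
  have e10 : PySem.Str.lower (PySem.Str.strip "occupational therapy") = "occupational therapy" := by decide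
  have e11 : PySem.Str.lower (PySem.Str.strip "occupational") = "occupational" := by decide
  have e12 : PySem.Str.lower (PySem.Str.strip "ot") = "ot" := by decide
  have e13 : PySem.Str.lower (PySem.Str.strip "physical therapy") = "physical therapy" := by decide
  have e14 : PySem.Str.lower (PySem.Str.strip "physical") = "physical" := by decide
  have e15 : PySem.Str.lower (PySem.Str.strip "pt") = "pt" := by decide
  have hT : pvTable =
      [("aba", "aba"), ("applied behavior analysis", "aba"), ("behavior", "aba"),
       ("behavioral therapy", "aba"), ("language", "speech"), ("occupational", "ot"),
       ("occupational therapy", "ot"), ("ot", "ot"), ("physical", "pt"),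
       ("physical therapy", "pt"), ("pt", "pt"), ("slp", "speech"),
       ("speech", "speech"), ("speech therapy", "speech"),
       ("speech-language pathology", "speech")] := by decide
  have hb : bsearch pvTable q 0 pvTable.length = none := by
    apply bsearch_none
    intro p hp
    rw [hT] at hp
    simp only [List.mem_cons, List.not_mem_nil, or_false] at hp
    rcases hp with h|h|h|h|h|h|h|h|h|h|h|h|h|h|h <;> subst h <;>
      simp_all [Ne.symm]
  have hs : termScan CONTROLLED_TERMS q = none := by
    simp [termScan, aliasScan, CONTROLLED_TERMS, e1, e2, e3, e4, e5, e6, e7, e8, e9, e10,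
      e11, e12, e13, e14, e15, h1, h2, h3, h4, h5, h6, h7, h8, h9, h10, h11, h12, h13, h14, h15]
  rw [hb]
  unfold afterScan
  rw [hs]

-- ===== VERDICT (by name: the statement is the Claim_ definition above) =====
theorem canonical_service_spec : Claim_equal_canonical_service := by
  intro query _
  simp only [Spec_canonical_service, canonical_service, canonical_service_alt, core]
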